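-- pv_equiv track=rewrite | github.com/matteoferla/Fragmenstein | examples/prueba.py | get_simplified_mol_name
-- ===== SOURCE A (Python) =====
-- from collections import defaultdict
--
-- def get_simplified_mol_name(mol_id):
--     '''
--     Reduce the mol_name for merges over fragments of fragments
--     :param mol_id:
--     :return:
--     '''
--     pieces = mol_id.split("-")
--     ids_dict = defaultdict( set)
--     for frag_id in pieces:
--         split_fragId = frag_id.split("_")
--         fragId_chainId = "-".join(split_fragId[:2])
--         if len(split_fragId)==3:
--             bit_id = split_fragId[2]
--         else:
--             bit_id = ""
--
--         ids_dict[fragId_chainId].add(bit_id)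
--
--     mol_id = ""
--     for fragId_chainId in sorted(ids_dict):
--         mol_id += fragId_chainId
--         for bit_id in sorted(ids_dict[fragId_chainId]):
--             mol_id+="_"+",".join(bit_id)
--     return mol_id
-- ===== SOURCE B (Python) =====
-- def get_simplified_mol_name(mol_id):
--     '''
--     Reduce the mol_name for merges over fragments of fragments
--     :param mol_id:
--     :return:
--     '''
--     pairs = []
--     for frag_id in mol_id.split("-"):
--         sp = frag_id.split("_")
--         pairs.append(("-".join(sp[:2]), sp[2] if len(sp) == 3 else ""))
--     out = ""
--     first = True
--     prev = ""
--     for key, bit in sorted(set(pairs)):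
--         if first or key != prev:
--             out += key
--             prev = key
--             first = False
--         out += "_" + ",".join(bit)
--     return out
-- ===== Notes on version B (the rewrite author's own statement) =====
-- stated objective: alternative
-- what changed: Replaces the defaultdict-of-sets grouping plus nested sorted-keys/sorted-bits loops by one flat (key, bit) pair list deduped and ordered in a single sorted(set(pairs)) lexicographic sort, then emitted in one linear pass that prints each key once via a previous-key flag.
import Mathlib
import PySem

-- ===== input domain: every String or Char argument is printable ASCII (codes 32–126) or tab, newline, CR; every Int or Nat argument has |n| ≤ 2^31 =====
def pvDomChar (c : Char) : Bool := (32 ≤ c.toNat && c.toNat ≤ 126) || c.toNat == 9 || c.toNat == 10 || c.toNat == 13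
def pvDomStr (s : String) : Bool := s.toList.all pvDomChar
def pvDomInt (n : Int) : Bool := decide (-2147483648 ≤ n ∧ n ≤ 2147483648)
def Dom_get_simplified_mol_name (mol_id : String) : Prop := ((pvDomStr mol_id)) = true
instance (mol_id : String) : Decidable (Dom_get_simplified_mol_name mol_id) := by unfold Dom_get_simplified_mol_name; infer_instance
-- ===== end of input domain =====

-- B replaces A's defaultdict-of-sets grouping with nested sorted-keys/sorted-bits loops by one flat
-- (key, bit) pair list, deduped and ordered by a single lexicographic sorted(set(pairs)), then emitted
-- in one linear pass with a previous-key flag (alternative decomposition, same cost).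

-- shared fragment decoding, identical text in both Pythons: frag_id.split("_"),
-- "-".join(split[:2]), split[2] if len(split)==3 else "", and ",".join(bit)
def pvSplit (s sep : String) : List String := (PySem.Str.split? s sep).getD []  -- sep is "-" or "_" here, never "", so split? is some (exact)
def pvKey (p : String) : String := PySem.Str.join "-" (PySem.List.slice (pvSplit p "_") none (some 2))
def pvBit (p : String) : String :=
  let sp := pvSplit p "_"
  if sp.length == 3 then PySem.List.pyGetD sp 2 "" else ""
def pvCJ (b : String) : String := PySem.Str.join "," (b.toList.map (fun c => String.ofList [c]))

-- ===== PORT A =====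
def get_simplified_mol_name (mol_id : String) : String :=
  let pieces := pvSplit mol_id "-"
  let ids_dict : PySem.Dict String (PySem.Set String) :=
    pieces.foldl (fun d frag_id => d.modify (pvKey frag_id) [] (fun s => PySem.Set.add s (pvBit frag_id)))
      PySem.Dict.empty
  (PySem.List.sorted ids_dict.keys (fun x => x) false).foldl
    (fun acc fragId_chainId =>
      (PySem.List.sorted (ids_dict.getD fragId_chainId []) (fun x => x) false).foldl
        (fun a bit_id => a ++ ("_" ++ pvCJ bit_id)) (acc ++ fragId_chainId))
    ""

-- ===== PORT B =====
-- loop body of Source B, state (first, prev, out)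
def pvStepB (st : Bool × String × String) (kb : String × String) : Bool × String × String :=
  let (first, prev, out) := st
  let (first2, prev2, out2) :=
    if first || kb.1 != prev then (false, kb.1, out ++ kb.1) else (first, prev, out)
  (first2, prev2, out2 ++ ("_" ++ pvCJ kb.2))

def get_simplified_mol_name_alt (mol_id : String) : String :=
  let pairs := (pvSplit mol_id "-").foldl (fun acc frag_id => acc ++ [(pvKey frag_id, pvBit frag_id)]) []
  let sp := PySem.List.sorted2 (PySem.Set.ofList pairs) Prod.fst Prod.snd false
  (sp.foldl pvStepB (true, "", "")).2.2

-- ===== PRECONDITION & SPEC =====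
def Spec_get_simplified_mol_name (mol_id : String) (out : String) : Prop := out = get_simplified_mol_name_alt mol_id
instance (mol_id : String) (out : String) : Decidable (Spec_get_simplified_mol_name mol_id out) := by unfold Spec_get_simplified_mol_name; infer_instance

-- ===== CLAIM (what is proved, stated in full; the proofs are below) =====
def Claim_equal_get_simplified_mol_name : Prop := ∀ (mol_id : String), Dom_get_simplified_mol_name mol_id → Spec_get_simplified_mol_name mol_id (get_simplified_mol_name mol_id)

-- ===== LEMMAS AND PROOFS =====

-- proof-side abbreviations: A's dict, its per-key bit sets, its sorted key list,
-- and the (key, bit) block each key contributes to B's sorted pair list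
def pvDictOf (P : List String) : PySem.Dict String (PySem.Set String) :=
  P.foldl (fun d p => d.modify (pvKey p) [] (fun s => PySem.Set.add s (pvBit p))) PySem.Dict.empty
def pvBits (P : List String) (k : String) : List String :=
  PySem.Set.ofList ((P.filter (fun p => pvKey p == k)).map pvBit)
def pvKeysS (P : List String) : List String :=
  PySem.List.sorted (PySem.Set.ofList (P.map pvKey)) (fun x => x) false
def pvChunk (P : List String) (k : String) : List (String × String) :=
  (PySem.List.sorted (pvBits P k) (fun x => x) false).map (fun b => (k, b))
def pvInner (a b : String) : String := a ++ ("_" ++ pvCJ b)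
def pvLex (a b : String × String) : Prop := a.1 < b.1 ∨ (a.1 = b.1 ∧ a.2 < b.2)

lemma pvDictOf_keys (P : List String) :
    (pvDictOf P).keys = PySem.Set.ofList (P.map pvKey) := by
  unfold pvDictOf
  rw [PySem.Dict.keys_foldl_modify_key P pvKey [] (fun _ p s => PySem.Set.add s (pvBit p))]
  simp [PySem.Set.update_nil_left]

lemma pvGetD_fold (P : List String) (d : PySem.Dict String (PySem.Set String)) (k : String) :
    (P.foldl (fun d p => d.modify (pvKey p) [] (fun s => PySem.Set.add s (pvBit p))) d).getD k []
      = ((P.filter (fun p => pvKey p == k)).map pvBit).foldl PySem.Set.add (d.getD k []) := by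
  induction P generalizing d with
  | nil => simp
  | cons p P ih =>
    by_cases h : pvKey p = k
    · simp only [List.foldl_cons, List.filter_cons, h, beq_self_eq_true, if_pos, List.map_cons]
      rw [ih, ← h, PySem.Dict.getD_modify_self]
    · simp only [List.foldl_cons, List.filter_cons]
      rw [if_neg (by simpa using h), ih, PySem.Dict.getD_modify_of_ne _ _ _ (Ne.symm h)]

lemma pvDictOf_getD (P : List String) (k : String) :
    (pvDictOf P).getD k [] = pvBits P k := by
  rw [pvDictOf, pvGetD_fold, pvBits]
  rw [PySem.Set.ofList_eq_foldl]
  rfl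

lemma pvMem_chunk (P : List String) (k : String) (x : String × String) :
    x ∈ pvChunk P k ↔ x.1 = k ∧ x.2 ∈ pvBits P k := by
  simp only [pvChunk, List.mem_map, PySem.List.mem_sorted]
  constructor
  · rintro ⟨b, hb, rfl⟩; exact ⟨rfl, hb⟩
  · rintro ⟨h1, h2⟩; exact ⟨x.2, h2, by rw [← h1]⟩

lemma pvMem_flatMap (P : List String) (x : String × String) :
    x ∈ (pvKeysS P).flatMap (pvChunk P) ↔ x ∈ PySem.Set.ofList (P.map (fun p => (pvKey p, pvBit p))) := by
  obtain ⟨x1, x2⟩ := x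
  simp only [List.mem_flatMap, PySem.Set.mem_ofList, List.mem_map, pvMem_chunk,
    pvKeysS, PySem.List.mem_sorted, pvBits, List.mem_filter]
  constructor
  · rintro ⟨k, hk, h1, h2⟩
    rcases h2 with ⟨p, ⟨hp, hpk⟩, hpb⟩
    exact ⟨p, hp, by rw [hpb]; simp at h1 hpk ⊢; rw [hpk, h1]⟩
  · rintro ⟨p, hp, hpx⟩
    simp at hpx
    refine ⟨pvKey p, ⟨p, hp, rfl⟩, hpx.1.symm, ⟨p, ⟨hp, by simp⟩, hpx.2⟩⟩

lemma pvPairwise_lt_keysS (P : List String) : (pvKeysS P).Pairwise (· < ·) :=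
  PySem.List.sorted_ofList_pairwise_lt _

lemma pvPairwise_lt_bits (P : List String) (k : String) :
    (PySem.List.sorted (pvBits P k) (fun x => x) false).Pairwise (· < ·) :=
  PySem.List.sorted_ofList_pairwise_lt _

lemma pvNodup_flatMap (P : List String) : ((pvKeysS P).flatMap (pvChunk P)).Nodup := by
  rw [List.nodup_flatMap]
  refine ⟨fun k _ => ?_, ?_⟩
  · exact ((pvPairwise_lt_bits P k).imp ne_of_lt).map _ (fun a b h hab => h (by injection hab))
  · refine (pvPairwise_lt_keysS P).imp ?_
    intro a b hab x hxa hxb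
    rw [pvMem_chunk] at hxa hxb
    exact absurd (hxa.1.symm.trans hxb.1) (ne_of_lt hab)

lemma pvPairwise_flatMap (P : List String) : ((pvKeysS P).flatMap (pvChunk P)).Pairwise pvLex := by
  have h := pvPairwise_lt_keysS P
  generalize pvKeysS P = ks at h ⊢
  induction h with
  | nil => simp
  | @cons k ks h1 h2 ih =>
    rw [List.flatMap_cons, List.pairwise_append]
    refine ⟨?_, ih, ?_⟩
    · exact (pvPairwise_lt_bits P k).map _ (fun a b hab => Or.inr ⟨rfl, hab⟩)
    · intro a ha b hb
      rw [pvMem_chunk] at ha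
      rcases List.mem_flatMap.1 hb with ⟨k', hk', hbk'⟩
      rw [pvMem_chunk] at hbk'
      exact Or.inl (by rw [ha.1, hbk'.1]; exact h1 k' hk')

-- Python's tuple '<' on pairs is the lexicographic order: the comparator sorted2 uses is toLex's '<'
lemma pvBefore_eq :
    (fun (a b : String × String) => decide (a.1 < b.1) || (!decide (b.1 < a.1) && decide (a.2 < b.2)))
      = (fun (a b : String × String) => decide (toLex a < toLex b)) := by
  funext a b
  rcases lt_trichotomy a.1 b.1 with h | h | h
  · simp [h, Prod.Lex.lt_iff, not_lt_of_gt h]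
  · simp [h, Prod.Lex.lt_iff]
  · simp [not_lt_of_gt h, h, Prod.Lex.lt_iff, ne_of_gt h]

lemma pvSorted2_as_lex (xs : List (String × String)) :
    PySem.List.sorted2 xs Prod.fst Prod.snd false
      = PySem.List.sorted xs (fun a => toLex a) false := by
  unfold PySem.List.sorted2 PySem.List.sorted
  simp only [if_neg (by simp : ¬ (false = true))]
  rw [pvBefore_eq]

-- naming B's sorted order: sorted(set(pairs)) is exactly A's sorted keys, each followed by its sorted bits
lemma pvSorted2_eq (P : List String) :
    PySem.List.sorted2 (PySem.Set.ofList (P.map (fun p => (pvKey p, pvBit p)))) Prod.fst Prod.snd false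
      = (pvKeysS P).flatMap (pvChunk P) := by
  rw [pvSorted2_as_lex]
  apply PySem.List.sorted_eq_of_perm_of_pairwise_lt
  · exact List.perm_of_nodup_nodup_toFinset_eq (pvNodup_flatMap P) (PySem.Set.nodup_ofList _)
      (Finset.ext fun x => by simp only [List.mem_toFinset]; exact pvMem_flatMap P x)
  · exact (pvPairwise_flatMap P).imp fun {a b} hab => by
      rw [Prod.Lex.lt_iff]; exact hab

lemma pvFoldB_tail (bs : List String) (k acc : String) :
    (bs.map (fun b => (k, b))).foldl pvStepB (false, k, acc) = (false, k, bs.foldl pvInner acc) := by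
  induction bs generalizing acc with
  | nil => rfl
  | cons b bs ih =>
    simp only [List.map_cons, List.foldl_cons]
    rw [show pvStepB (false, k, acc) (k, b) = (false, k, pvInner acc b) by
      simp [pvStepB, pvInner]]
    exact ih _

lemma pvFoldB_chunk (bs : List String) (k : String) (first : Bool) (prev acc : String)
    (h : first = true ∨ k ≠ prev) (hbs : bs ≠ []) :
    (bs.map (fun b => (k, b))).foldl pvStepB (first, prev, acc)
      = (false, k, bs.foldl pvInner (acc ++ k)) := by
  match bs with
  | [] => exact absurd rfl hbs
  | b :: bs =>
    simp only [List.map_cons, List.foldl_cons]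
    rw [show pvStepB (first, prev, acc) (k, b) = (false, k, pvInner (acc ++ k) b) by
      rcases h with h | h
      · simp [pvStepB, pvInner, h]
      · simp [pvStepB, pvInner, bne_iff_ne, h]]
    exact pvFoldB_tail bs k _

lemma pvFoldB_main (P : List String) (ks : List String) (hlt : ks.Pairwise (· < ·))
    (hne : ∀ k ∈ ks, pvBits P k ≠ []) (first : Bool) (prev acc : String)
    (h : first = true ∨ ∀ k ∈ ks, k ≠ prev) :
    ((ks.flatMap (pvChunk P)).foldl pvStepB (first, prev, acc)).2.2
      = ks.foldl (fun a k => (PySem.List.sorted (pvBits P k) (fun x => x) false).foldl pvInner (a ++ k)) acc := by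
  induction ks generalizing first prev acc with
  | nil => rfl
  | cons k ks ih =>
    rw [List.pairwise_cons] at hlt
    rw [List.flatMap_cons, List.foldl_append, pvChunk,
      pvFoldB_chunk _ k first prev acc
        (h.imp id (fun hh => hh k (List.mem_cons_self)))
        (by simp [PySem.List.sorted_eq_nil_iff]; exact hne k List.mem_cons_self)]
    rw [List.foldl_cons]
    exact ih hlt.2 (fun k' hk' => hne k' (List.mem_cons_of_mem _ hk'))
      false k _ (Or.inr fun k' hk' => (ne_of_gt (hlt.1 k' hk')))

lemma pvBits_ne_nil (P : List String) (k : String) (hk : k ∈ pvKeysS P) : pvBits P k ≠ [] := by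
  rw [pvKeysS, PySem.List.mem_sorted, PySem.Set.mem_ofList, List.mem_map] at hk
  rcases hk with ⟨p, hp, rfl⟩
  have hm : pvBit p ∈ pvBits P (pvKey p) := by
    rw [pvBits, PySem.Set.mem_ofList, List.mem_map]
    exact ⟨p, List.mem_filter.2 ⟨hp, by simp⟩, rfl⟩
  exact fun h => by rw [h] at hm; simp at hm

-- ===== VERDICT (by name: the statement is the Claim_ definition above) =====
theorem get_simplified_mol_name_spec : Claim_equal_get_simplified_mol_name := by
  intro mol_id _
  unfold Spec_get_simplified_mol_name get_simplified_mol_name get_simplified_mol_name_alt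
  simp only [PySem.List.foldl_append_singleton_eq_map, List.nil_append]
  rw [show (List.foldl (fun d frag_id => d.modify (pvKey frag_id) [] (fun s => PySem.Set.add s (pvBit frag_id)))
        PySem.Dict.empty (pvSplit mol_id "-")) = pvDictOf (pvSplit mol_id "-") from rfl]
  rw [pvDictOf_keys, pvSorted2_eq, ← pvKeysS]
  rw [pvFoldB_main (pvSplit mol_id "-") (pvKeysS (pvSplit mol_id "-")) (pvPairwise_lt_keysS _)
    (fun k hk => pvBits_ne_nil _ k hk) true "" "" (Or.inl rfl)]
  have hfun : (fun (acc : String) (k : String) =>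
      (PySem.List.sorted ((pvDictOf (pvSplit mol_id "-")).getD k []) (fun x => x) false).foldl
        (fun a b => a ++ ("_" ++ pvCJ b)) (acc ++ k))
      = (fun (acc : String) (k : String) =>
      (PySem.List.sorted (pvBits (pvSplit mol_id "-") k) (fun x => x) false).foldl pvInner (acc ++ k)) := by
    funext acc k
    rw [pvDictOf_getD]
    rfl
  rw [hfun]
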